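-- pv_equiv track=rewrite | github.com/valservox/glowbyte_test | python_tets/task_2.py | kind_of_scrable
-- ===== SOURCE A (Python) =====
-- def kind_of_scrable(input_string, word_list: list):
--
--     found_words = []
--
--     for i in word_list:
--
--         search_from = 0
--         const = True
--
--         for j in i:
--
--             if not const:
--                 continue
--
--             if j in input_string[search_from:]:
--
--                 search_from = i.index(j) + 1
--
--             else:
--                 const = False
--
--         if not const:
--             continue
--
--         found_words.append(i)
--
--     max_word_len = len(max(found_words, key=len))
--
--     return min(list(filter(lambda x: len(x) == max_word_len, found_words)))
-- ===== SOURCE B (Python) =====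
-- def kind_of_scrable(input_string, word_list: list):
--     # Precompute last occurrence of each char in input_string: membership of ch in
--     # input_string[bound:] is exactly last[ch] >= bound.  One pass per word, and the
--     # best (longest, then lexicographically smallest) word is tracked on the fly.
--     last = {}
--     for pos, ch in enumerate(input_string):
--         last[ch] = pos
--     best, max_len = "", -1
--     for word in word_list:
--         first_seen = {}
--         bound = 0
--         ok = True
--         for k, ch in enumerate(word):
--             if ch not in first_seen:
--                 first_seen[ch] = k
--             if last.get(ch, -1) < bound:
--                 ok = False
--                 break
--             bound = first_seen[ch] + 1
--         if ok:
--             if max_len < len(word):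
--                 best, max_len = word, len(word)
--             elif len(word) == max_len and word < best:
--                 best = word
--     return best
-- ===== Notes on version B (the rewrite author's own statement) =====
-- stated objective: faster
-- what changed: B precomputes a last-occurrence dict for input_string so each per-character suffix-membership test and the word-internal first-index lookup become O(1) dict lookups instead of slicing/scanning, and it tracks the best (longest, then lexicographically smallest) word in a single running fold instead of max+filter+min passes.
import Mathlib
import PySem

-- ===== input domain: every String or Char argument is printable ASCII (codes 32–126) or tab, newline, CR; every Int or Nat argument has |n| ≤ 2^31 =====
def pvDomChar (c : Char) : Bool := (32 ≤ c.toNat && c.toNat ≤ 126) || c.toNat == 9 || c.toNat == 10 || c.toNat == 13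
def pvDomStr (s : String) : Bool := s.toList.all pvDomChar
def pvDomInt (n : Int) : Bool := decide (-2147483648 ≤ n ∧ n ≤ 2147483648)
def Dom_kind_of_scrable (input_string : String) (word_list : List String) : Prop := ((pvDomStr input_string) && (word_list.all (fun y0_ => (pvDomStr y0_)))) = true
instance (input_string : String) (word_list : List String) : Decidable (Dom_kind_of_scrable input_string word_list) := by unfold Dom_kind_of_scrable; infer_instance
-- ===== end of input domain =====

-- B replaces A's per-character slice scans and word.index re-scans by a precomputed
-- last-occurrence dict (plus a running first-seen dict per word) and selects the
-- longest, lexicographically-smallest passing word in one running fold.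

-- ===== PORT A =====
-- loop body of A's inner 'for j in i' (st = (search_from, const))
def pvAStep (sL iL : List Char) (st : Int × Bool) (j : Char) : Int × Bool :=
  if !st.2 then st
  else if PySem.Chars.isIn [j] (PySem.List.slice sL (some st.1) none) then
    (PySem.Chars.find iL [j] + 1, true)   -- i.index(j) + 1  (j ∈ i here, so find = index)
  else (st.1, false)

def kind_of_scrable (input_string : String) (word_list : List String) : String :=
  let found := word_list.foldl (fun acc i =>
      let st := i.toList.foldl (pvAStep input_string.toList i.toList) (0, true)
      if !st.2 then acc else acc ++ [i]) []
  match PySem.List.max? found PySem.Str.len with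
  | none => ""   -- found_words = []: Python's max([]) raises ValueError; excluded by Pre_
  | some m =>
    (PySem.List.min? (found.filter (fun x => PySem.Str.len x == PySem.Str.len m)) (fun x => x)).getD ""

-- ===== PORT B =====
-- Source B's inner word loop ('for k, ch in enumerate(word)', break modelled by recursion)
def pvBCheckGo (last fs : PySem.Dict Char Int) (bound k : Int) : List Char → Bool
  | [] => true
  | c :: rest =>
    let fs' := if fs.contains c then fs else fs.insert c k
    if last.getD c (-1) < bound then false
    else pvBCheckGo last fs' (fs'.getD c 0 + 1) (k + 1) rest

-- Source B's running best/max_len update (acc = (best, max_len))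
def pvBSel (acc : String × Int) (w : String) : String × Int :=
  if acc.2 < PySem.Str.len w then (w, PySem.Str.len w)
  else if PySem.Str.len w == acc.2 && decide (w < acc.1) then (w, acc.2)
  else acc

def kind_of_scrable_alt (input_string : String) (word_list : List String) : String :=
  let last := (PySem.List.enumerate input_string.toList 0).foldl
      (fun (d : PySem.Dict Char Int) pc => d.insert pc.2 pc.1) PySem.Dict.empty
  (word_list.foldl (fun acc w =>
      if pvBCheckGo last PySem.Dict.empty 0 0 w.toList then pvBSel acc w else acc)
    ("", -1)).1

-- ===== PRECONDITION & SPEC =====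
-- spec helpers (used only by Pre_/Raises_; independent of both ports):
-- index of the last occurrence of c in s, -1 if c does not occur
def pvLastIdx : List Char → Char → Int
  | [], _ => -1
  | x :: rest, c =>
    let r := pvLastIdx rest c
    if r = -1 then (if x = c then 0 else -1) else r + 1

-- word wL passes A's filter iff every character wL[k] occurs in the input at or after
-- position (first index in wL of wL[k-1]) + 1 (at or after 0 for k = 0)
def pvOk (sL wL : List Char) : Bool :=
  (List.range wL.length).all (fun k =>
    decide ((if k = 0 then 0 else (wL.idxOf (wL.getD (k-1) ' ') : Int) + 1) ≤ pvLastIdx sL (wL.getD k ' ')))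

-- Pre_ excludes exactly the inputs on which found_words stays empty: there Python's A
-- raises ValueError (max of an empty sequence) instead of returning.
def Pre_kind_of_scrable (input_string : String) (word_list : List String) : Prop :=
  ∃ w ∈ word_list, pvOk input_string.toList w.toList = true
instance (input_string : String) (word_list : List String) : Decidable (Pre_kind_of_scrable input_string word_list) := by unfold Pre_kind_of_scrable; infer_instance
def pvWitness_kind_of_scrable : String × List String := ("a", ["a"])

def Spec_kind_of_scrable (input_string : String) (word_list : List String) (out : String) : Prop := out = kind_of_scrable_alt input_string word_list
instance (input_string : String) (word_list : List String) (out : String) : Decidable (Spec_kind_of_scrable input_string word_list out) := by unfold Spec_kind_of_scrable; infer_instance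

-- ===== CLAIM (what is proved, stated in full; the proofs are below) =====
def Claim_equal_kind_of_scrable : Prop := ∀ (input_string : String) (word_list : List String), Dom_kind_of_scrable input_string word_list → Pre_kind_of_scrable input_string word_list → Spec_kind_of_scrable input_string word_list (kind_of_scrable input_string word_list)
-- ===== LEMMAS AND PROOFS =====

theorem pvLastIdx_ge (s : List Char) (c : Char) : -1 ≤ pvLastIdx s c := by
  induction s with
  | nil => simp [pvLastIdx]
  | cons x rest ih => simp only [pvLastIdx]; split_ifs <;> omega

theorem mem_iff_lastIdx (c : Char) (s : List Char) : c ∈ s ↔ 0 ≤ pvLastIdx s c := by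
  induction s with
  | nil => simp [pvLastIdx]
  | cons x rest ih =>
    have hge := pvLastIdx_ge rest c
    by_cases hr : pvLastIdx rest c = -1 <;> by_cases hx : x = c
    · subst hx; simp [pvLastIdx, hr]
    · simp only [List.mem_cons, pvLastIdx, hr, if_true, hx, if_false]
      constructor
      · rintro (h | h)
        · exact absurd h.symm hx
        · exact absurd (ih.mp h) (by omega)
      · intro h; omega
    · subst hx
      simp only [List.mem_cons, pvLastIdx, hr, if_false, true_or, true_iff]
      omega
    · simp only [List.mem_cons, pvLastIdx, hr, if_false, ih]
      constructor
      · intro _; omega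
      · intro _; right; omega

theorem mem_drop_iff_lastIdx (c : Char) (s : List Char) (n : Nat) :
    c ∈ s.drop n ↔ (n : Int) ≤ pvLastIdx s c := by
  induction s generalizing n with
  | nil => simp only [List.drop_nil, List.not_mem_nil, pvLastIdx, false_iff]; omega
  | cons x rest ih =>
    cases n with
    | zero => simpa using mem_iff_lastIdx c (x :: rest)
    | succ m =>
      have hge := pvLastIdx_ge rest c
      rw [List.drop_succ_cons, ih m]
      simp only [pvLastIdx]
      split_ifs <;> push_cast <;> omega
theorem idxOf_le_of_getElem (c : Char) : ∀ (l : List Char) (k : Nat) (h : k < l.length), l[k] = c → l.idxOf c ≤ k := by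
  intro l
  induction l with
  | nil => intro k h; simp at h
  | cons x rest ih =>
    intro k h hc
    by_cases hx : x = c
    · subst hx; simp [List.idxOf_cons_self]
    · cases k with
      | zero => simp at hc; exact absurd hc hx
      | succ m =>
        rw [List.idxOf_cons_ne _ (by simpa using hx)]
        exact Nat.succ_le_succ (ih m (by simpa using h) (by simpa using hc))

theorem singleton_prefix_iff (t : List Char) (c : Char) : [c] <+: t ↔ t.head? = some c := by
  cases t with
  | nil => simp
  | cons x r =>
    constructor
    · rintro ⟨s, hs⟩; simp at hs; simp [hs.1]
    · intro h; simp at h; subst h; exact ⟨r, rfl⟩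

theorem find_singleton_eq_idxOf (l : List Char) (c : Char) (h : c ∈ l) :
    PySem.Chars.find l [c] = (l.idxOf c : Int) := by
  have h0 : 0 ≤ PySem.Chars.find l [c] :=
    (PySem.Chars.find_nonneg_iff l [c]).mpr ((List.singleton_infix_iff c l).mpr h)
  obtain ⟨hpre, hmin⟩ := PySem.Chars.find_spec h0
  have hk : l[(PySem.Chars.find l [c]).toNat]? = some c := by
    rw [← List.head?_drop]
    exact (singleton_prefix_iff _ c).mp hpre
  have hklt : (PySem.Chars.find l [c]).toNat < l.length := (List.getElem?_eq_some_iff.mp hk).1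
  have hkc : l[(PySem.Chars.find l [c]).toNat]'hklt = c := (List.getElem?_eq_some_iff.mp hk).2
  have h1 : l.idxOf c ≤ (PySem.Chars.find l [c]).toNat := idxOf_le_of_getElem c l _ hklt hkc
  have hj : l.idxOf c < l.length := List.idxOf_lt_length_of_mem h
  have h2 : (PySem.Chars.find l [c]).toNat ≤ l.idxOf c := by
    by_contra hlt
    exact hmin (l.idxOf c) (by omega) ((singleton_prefix_iff _ c).mpr (by
      rw [List.head?_drop]
      exact List.getElem?_eq_some_iff.mpr ⟨hj, List.getElem_idxOf hj⟩))
  omega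

theorem isIn_slice_eq (sL : List Char) (c : Char) (b : Int) (hb : 0 ≤ b) :
    PySem.Chars.isIn [c] (PySem.List.slice sL (some b) none) = decide (b ≤ pvLastIdx sL c) := by
  rw [Bool.eq_iff_iff]
  rw [PySem.Chars.isIn_iff_infix, List.singleton_infix_iff, PySem.List.slice_from sL hb,
    mem_drop_iff_lastIdx, Int.toNat_of_nonneg hb]
  simp

theorem lastDict_getD (s : List Char) (c : Char) : ∀ (t : Int) (d : PySem.Dict Char Int),
    ((PySem.List.enumerate s t).foldl (fun (d : PySem.Dict Char Int) pc => d.insert pc.2 pc.1) d).getD c (-1)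
      = if pvLastIdx s c = -1 then d.getD c (-1) else t + pvLastIdx s c := by
  induction s with
  | nil => intro t d; simp [PySem.List.enumerate_nil, pvLastIdx]
  | cons x rest ih =>
    intro t d
    rw [PySem.List.enumerate_cons, List.foldl_cons, ih]
    have hge := pvLastIdx_ge rest c
    simp only [pvLastIdx, PySem.Dict.getD_insert]
    by_cases hr : pvLastIdx rest c = -1 <;> by_cases hx : x = c
    · subst hx; simp [hr]
    · have hcx : ¬ (c = x) := fun h => hx h.symm
      simp [hr, hx, hcx]
    · subst hx
      rw [if_neg hr, if_neg (by omega)]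
      omega
    · rw [if_neg hr, if_neg (by omega)]
      omega

def pvChk (sL w : List Char) : Int → List Char → Bool
  | _, [] => true
  | b, c :: rest => decide (b ≤ pvLastIdx sL c) && pvChk sL w ((w.idxOf c : Int) + 1) rest

theorem foldl_pvAStep_false (sL iL : List Char) (rest : List Char) (st : Int × Bool)
    (h : st.2 = false) : rest.foldl (pvAStep sL iL) st = st := by
  induction rest generalizing st with
  | nil => rfl
  | cons c r ih => simp only [List.foldl_cons, pvAStep, h]; exact ih _ h

theorem foldl_pvAStep_eq_chk (sL w : List Char) : ∀ (rest : List Char) (b : Int), 0 ≤ b →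
    rest <:+ w → (rest.foldl (pvAStep sL w) (b, true)).2 = pvChk sL w b rest := by
  intro rest
  induction rest with
  | nil => intro b _ _; rfl
  | cons c r ih =>
    intro b hb hsuf
    have hcw : c ∈ w := hsuf.subset (List.mem_cons_self ..)
    have hrw : r <:+ w := (List.suffix_cons c r).trans hsuf
    rw [List.foldl_cons]
    simp only [pvAStep, Bool.not_true, if_false, Bool.false_eq_true,
      isIn_slice_eq sL c b hb, pvChk]
    by_cases h : b ≤ pvLastIdx sL c
    · rw [if_pos (by simpa using h), decide_eq_true h, Bool.true_and,
        find_singleton_eq_idxOf w c hcw]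
      exact ih _ (by positivity) hrw
    · rw [if_neg (by simpa using h), decide_eq_false h, Bool.false_and,
        foldl_pvAStep_false _ _ _ _ rfl]

theorem idxOf_append_not_mem (p t : List Char) (c : Char) (h : c ∉ p) :
    (p ++ c :: t).idxOf c = p.length := by
  induction p with
  | nil => simp [List.idxOf_cons_self]
  | cons x p' ih =>
    have hx : x ≠ c := fun he => h (by simp [he])
    rw [List.cons_append, List.idxOf_cons_ne _ (by simpa using hx),
      ih (fun hm => h (List.mem_cons_of_mem _ hm))]
    simp [List.length_cons]

theorem idxOf_append_cons (p t : List Char) (c : Char) :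
    (p ++ c :: t).idxOf c = (p ++ [c]).idxOf c := by
  by_cases h : c ∈ p
  · rw [List.idxOf_append_of_mem h, List.idxOf_append_of_mem h]
  · rw [idxOf_append_not_mem p t c h, idxOf_append_not_mem p [] c h]

theorem pvBCheckGo_eq_chk (sL w : List Char) (last : PySem.Dict Char Int)
    (hlast : ∀ c, last.getD c (-1) = pvLastIdx sL c) :
    ∀ (rest p : List Char) (fs : PySem.Dict Char Int) (b : Int), w = p ++ rest →
    (∀ x, fs.contains x = decide (x ∈ p)) →
    (∀ x d, fs.getD x d = if x ∈ p then (p.idxOf x : Int) else d) →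
    pvBCheckGo last fs b (p.length : Int) rest = pvChk sL w b rest := by
  intro rest
  induction rest with
  | nil => intro p fs b _ _ _; rfl
  | cons c r ih =>
    intro p fs b hw hcont hget
    simp only [pvBCheckGo, pvChk, hlast]
    by_cases hcond : pvLastIdx sL c < b
    · rw [if_pos hcond, Eq.symm (Bool.false_and _), decide_eq_false (by omega)]
    · rw [if_neg hcond, decide_eq_true (by omega), Bool.true_and]
      have hcont' : ∀ x, (if fs.contains c then fs else fs.insert c (p.length : Int)).contains x
          = decide (x ∈ p ++ [c]) := by
        intro x
        by_cases hcp : c ∈ p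
        · rw [if_pos (by rw [hcont]; exact decide_eq_true hcp), hcont]
          refine decide_eq_decide.mpr ⟨fun h => List.mem_append_left _ h, fun h => ?_⟩
          rcases List.mem_append.mp h with h | h
          · exact h
          · exact (List.mem_singleton.mp h) ▸ hcp
        · rw [if_neg (by simp [hcont, hcp]), PySem.Dict.contains_insert, hcont,
            Bool.beq_eq_decide_eq]
          simp [List.mem_append, Bool.or_comm]
      have hget' : ∀ x d, (if fs.contains c then fs else fs.insert c (p.length : Int)).getD x d
          = if x ∈ p ++ [c] then ((p ++ [c]).idxOf x : Int) else d := by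
        intro x d
        by_cases hcp : c ∈ p
        · rw [if_pos (by rw [hcont]; exact decide_eq_true hcp), hget]
          by_cases hx : x ∈ p
          · rw [if_pos hx, if_pos (List.mem_append_left _ hx), List.idxOf_append_of_mem hx]
          · rw [if_neg hx, if_neg (fun h => by
              rcases List.mem_append.mp h with h | h
              · exact hx h
              · exact hx ((List.mem_singleton.mp h) ▸ hcp))]
        · rw [if_neg (by simp [hcont, hcp]), PySem.Dict.getD_insert, hget]
          by_cases hx : x = c
          · subst hx
            rw [if_pos rfl, if_pos (List.mem_append_right _ (List.mem_singleton.mpr rfl)),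
              idxOf_append_not_mem p [] x hcp]
          · rw [if_neg hx]
            by_cases hxp : x ∈ p
            · rw [if_pos hxp, if_pos (List.mem_append_left _ hxp), List.idxOf_append_of_mem hxp]
            · rw [if_neg hxp, if_neg (fun h => by
                rcases List.mem_append.mp h with h | h
                · exact hxp h
                · exact hx (List.mem_singleton.mp h))]
      have hb' : (if fs.contains c then fs else fs.insert c (p.length : Int)).getD c 0
          = ((p ++ [c]).idxOf c : Int) := by
        rw [hget' c 0, if_pos (List.mem_append_right _ (List.mem_singleton.mpr rfl))]
      rw [hb']
      have hidx : (w.idxOf c : Int) = ((p ++ [c]).idxOf c : Int) := by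
        rw [hw, idxOf_append_cons p r c]
      rw [hidx]
      have hlen : (p.length : Int) + 1 = (((p ++ [c]).length : Nat) : Int) := by
        push_cast [List.length_append, List.length_singleton]; ring
      rw [hlen]
      exact ih (p ++ [c]) _ _ (by rw [hw, List.append_assoc]; rfl) hcont' hget'

theorem chk_drop_eq_range' (sL w : List Char) : ∀ (n m : Nat), m + n = w.length →
    pvChk sL w (if m = 0 then 0 else (w.idxOf (w.getD (m-1) ' ') : Int) + 1) (w.drop m)
      = (List.range' m n).all (fun k =>
          decide ((if k = 0 then 0 else (w.idxOf (w.getD (k-1) ' ') : Int) + 1) ≤ pvLastIdx sL (w.getD k ' '))) := by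
  intro n
  induction n with
  | zero =>
    intro m hm
    rw [show m = w.length by omega, List.drop_length]
    rfl
  | succ n ih =>
    intro m hm
    have hmlt : m < w.length := by omega
    rw [List.range'_succ, List.all_cons,
      show w.drop m = w[m] :: w.drop (m+1) from (List.getElem_cons_drop hmlt).symm]
    simp only [pvChk]
    rw [show w.getD m ' ' = w[m] from List.getD_eq_getElem w ' ' hmlt]
    have := ih (m+1) (by omega)
    rw [show (m+1) - 1 = m from rfl] at this
    rw [if_neg (Nat.succ_ne_zero m)] at this
    rw [show w.getD m ' ' = w[m] from List.getD_eq_getElem w ' ' hmlt] at this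
    rw [this]

theorem chk_eq_pvOk (sL w : List Char) : pvChk sL w 0 w = pvOk sL w := by
  have := chk_drop_eq_range' sL w w.length 0 (by omega)
  simp only [List.drop_zero, if_true] at this
  rw [this, pvOk, List.range_eq_range']

theorem dict_empty_getD (c : Char) (d : Int) : (PySem.Dict.empty : PySem.Dict Char Int).getD c d = d := by
  simp [PySem.Dict.getD, PySem.Dict.get?, PySem.Dict.empty]

theorem dict_empty_contains (c : Char) : (PySem.Dict.empty : PySem.Dict Char Int).contains c = false := by
  simp [PySem.Dict.contains, PySem.Dict.empty]

theorem passA_eq_pvOk (sL w : List Char) :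
    (w.foldl (pvAStep sL w) (0, true)).2 = pvOk sL w := by
  rw [foldl_pvAStep_eq_chk sL w w 0 le_rfl (List.suffix_refl w), chk_eq_pvOk]

theorem passB_eq_pvOk (sL w : List Char) :
    pvBCheckGo ((PySem.List.enumerate sL 0).foldl (fun (d : PySem.Dict Char Int) pc => d.insert pc.2 pc.1) PySem.Dict.empty) PySem.Dict.empty 0 0 w = pvOk sL w := by
  have hlast : ∀ c, ((PySem.List.enumerate sL 0).foldl (fun (d : PySem.Dict Char Int) pc => d.insert pc.2 pc.1) PySem.Dict.empty).getD c (-1) = pvLastIdx sL c := by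
    intro c
    rw [lastDict_getD]
    split_ifs with h
    · rw [dict_empty_getD, h]
    · omega
  have := pvBCheckGo_eq_chk sL w _ hlast w [] PySem.Dict.empty 0 rfl
    (fun x => by rw [dict_empty_contains]; simp)
    (fun x d => by rw [dict_empty_getD]; simp)
  rw [← chk_eq_pvOk]
  simpa using this

-- the two per-word filters agree (both are pvOk, the predicate Pre_ quantifies over)
theorem pass_eq (sL : List Char) (w : List Char) :
    (w.foldl (pvAStep sL w) (0, true)).2
      = pvBCheckGo ((PySem.List.enumerate sL 0).foldl (fun (d : PySem.Dict Char Int) pc => d.insert pc.2 pc.1) PySem.Dict.empty) PySem.Dict.empty 0 0 w :=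
  (passA_eq_pvOk sL w).trans (passB_eq_pvOk sL w).symm

def pvIsBest (l : List String) (r : String) : Prop :=
  r ∈ l ∧ (∀ y ∈ l, PySem.Str.len y ≤ PySem.Str.len r) ∧
    (∀ y ∈ l, PySem.Str.len y = PySem.Str.len r → r ≤ y)

theorem pvIsBest_unique {l : List String} {r1 r2 : String}
    (h1 : pvIsBest l r1) (h2 : pvIsBest l r2) : r1 = r2 := by
  obtain ⟨m1, b1, s1⟩ := h1
  obtain ⟨m2, b2, s2⟩ := h2
  have he : PySem.Str.len r2 = PySem.Str.len r1 := le_antisymm (b1 r2 m2) (b2 r1 m1)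
  exact le_antisymm (s1 r2 m2 he) (s2 r1 m1 he.symm)

theorem pvIsBest_A (l : List String) (hl : l ≠ []) :
    pvIsBest l (match PySem.List.max? l PySem.Str.len with
      | none => ""
      | some m => (PySem.List.min? (l.filter (fun x => PySem.Str.len x == PySem.Str.len m)) (fun x => x)).getD "") := by
  cases hmax : PySem.List.max? l PySem.Str.len with
  | none => exact absurd ((PySem.List.max?_eq_none_iff _ _).mp hmax) hl
  | some m =>
    dsimp only
    have hmem : m ∈ l := PySem.List.max?_mem hmax
    have hbound := PySem.List.max?_isMax hmax
    have hmfl : m ∈ l.filter (fun x => PySem.Str.len x == PySem.Str.len m) :=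
      List.mem_filter.mpr ⟨hmem, by simp⟩
    cases hmin : PySem.List.min? (l.filter (fun x => PySem.Str.len x == PySem.Str.len m)) (fun x => x) with
    | none =>
      rw [(PySem.List.min?_eq_none_iff _ _).mp hmin] at hmfl
      exact absurd hmfl (List.not_mem_nil)
    | some r =>
      have hrfl := PySem.List.min?_mem hmin
      have hrl : r ∈ l := (List.mem_filter.mp hrfl).1
      have hrlen : PySem.Str.len r = PySem.Str.len m := by
        simpa using (List.mem_filter.mp hrfl).2
      have hminp := PySem.List.min?_isMin hmin
      rw [Option.getD_some]
      refine ⟨hrl, fun y hy => by rw [hrlen]; exact hbound y hy, fun y hy hylen => ?_⟩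
      exact hminp y (List.mem_filter.mpr ⟨hy, by rw [hylen, hrlen]; simp⟩)

theorem pvBSel_step (b x : String) :
    ∃ b2, pvBSel (b, PySem.Str.len b) x = (b2, PySem.Str.len b2)
      ∧ (b2 = b ∨ b2 = x)
      ∧ PySem.Str.len b ≤ PySem.Str.len b2
      ∧ PySem.Str.len x ≤ PySem.Str.len b2
      ∧ (PySem.Str.len b = PySem.Str.len b2 → b2 ≤ b)
      ∧ (PySem.Str.len x = PySem.Str.len b2 → b2 ≤ x) := by
  by_cases h1 : PySem.Str.len b < PySem.Str.len x
  · have hn : b.length < x.length := by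
      simpa [PySem.Str.len_eq] using h1
    exact ⟨x, by simp [pvBSel, PySem.Str.len_eq, hn],
      Or.inr rfl, le_of_lt h1, le_rfl, fun h => absurd h (by omega), fun _ => le_rfl⟩
  · by_cases h2 : PySem.Str.len x = PySem.Str.len b ∧ x < b
    · have hn : x.length = b.length := by
        have := h2.1; simp [PySem.Str.len_eq] at this; exact_mod_cast this
      refine ⟨x, ?_, Or.inr rfl, by omega, by omega, fun _ => le_of_lt h2.2, fun _ => le_rfl⟩
      simp [pvBSel, PySem.Str.len_eq, hn, h2.2]
    · have h1n : ¬ b.length < x.length := by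
        intro hc; exact h1 (by simp [PySem.Str.len_eq]; exact_mod_cast hc)
      have h2n : ¬ (x.length = b.length ∧ x.toList < b.toList) := by
        rintro ⟨ha, hb⟩
        exact h2 ⟨by simp [PySem.Str.len_eq]; exact_mod_cast ha, String.lt_iff_toList_lt.mpr hb⟩
      refine ⟨b, ?_, Or.inl rfl, le_rfl, by omega, fun _ => le_rfl, fun hlen => ?_⟩
      · simp [pvBSel, PySem.Str.len_eq, h1n, h2n]
      · by_contra hlt
        exact h2 ⟨by omega, lt_of_not_ge hlt⟩

theorem pvIsBest_B (l : List String) : ∀ (b : String),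
    pvIsBest (b :: l) ((l.foldl pvBSel (b, PySem.Str.len b)).1) := by
  induction l with
  | nil =>
    intro b
    exact ⟨List.mem_cons_self .., fun y hy => by simp at hy; simp [hy],
      fun y hy _ => by simp at hy; simp [hy]⟩
  | cons x t ih =>
    intro b
    obtain ⟨b2, hpair, hbx, hlb, hlx, hcb, hcx⟩ := pvBSel_step b x
    rw [List.foldl_cons, hpair]
    obtain ⟨hmem, hbound, hmin⟩ := ih b2
    set r := (t.foldl pvBSel (b2, PySem.Str.len b2)).1 with hr
    have hb2r : PySem.Str.len b2 ≤ PySem.Str.len r := hbound b2 (List.mem_cons_self ..)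
    refine ⟨?_, ?_, ?_⟩
    · rcases List.mem_cons.mp hmem with h | h
      · rcases hbx with hb | hb
        · exact h ▸ hb ▸ List.mem_cons_self ..
        · exact List.mem_cons.mpr (Or.inr (h ▸ hb ▸ List.mem_cons_self ..))
      · exact List.mem_cons.mpr (Or.inr (List.mem_cons.mpr (Or.inr h)))
    · intro y hy
      rcases List.mem_cons.mp hy with h | h
      · subst h; omega
      rcases List.mem_cons.mp h with h | h
      · subst h; omega
      · exact hbound y (List.mem_cons.mpr (Or.inr h))
    · intro y hy hylen
      rcases List.mem_cons.mp hy with h | h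
      · subst h
        have h2 : r ≤ b2 := hmin b2 (List.mem_cons_self ..) (by omega)
        exact le_trans h2 (hcb (by omega))
      rcases List.mem_cons.mp h with h | h
      · subst h
        have h2 : r ≤ b2 := hmin b2 (List.mem_cons_self ..) (by omega)
        exact le_trans h2 (hcx (by omega))
      · exact hmin y (List.mem_cons.mpr (Or.inr h)) hylen

theorem sel_main (l : List String) :
    (match PySem.List.max? l PySem.Str.len with
      | none => ""
      | some m => (PySem.List.min? (l.filter (fun x => PySem.Str.len x == PySem.Str.len m)) (fun x => x)).getD "")
    = (l.foldl pvBSel ("", -1)).1 := by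
  cases l with
  | nil => rfl
  | cons x t =>
    have h0 : pvBSel ("", -1) x = (x, PySem.Str.len x) := by
      have h : (-1 : Int) < (x.length : Int) := by omega
      simp [pvBSel, h]
    rw [List.foldl_cons, h0]
    exact pvIsBest_unique (pvIsBest_A (x :: t) (List.cons_ne_nil x t)) (pvIsBest_B t x)

theorem main_eq (s : String) (wl : List String) :
    kind_of_scrable s wl = kind_of_scrable_alt s wl := by
  rw [kind_of_scrable, kind_of_scrable_alt]
  have hA : (wl.foldl (fun acc i =>
      let st := i.toList.foldl (pvAStep s.toList i.toList) ((0:Int), true)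
      if !st.2 then acc else acc ++ [i]) ([] : List String))
      = wl.filter (fun i => (i.toList.foldl (pvAStep s.toList i.toList) ((0:Int), true)).2) := by
    have hfun : (fun (acc : List String) i =>
        let st := i.toList.foldl (pvAStep s.toList i.toList) ((0:Int), true)
        if !st.2 then acc else acc ++ [i])
        = (fun (acc : List String) i =>
            if (i.toList.foldl (pvAStep s.toList i.toList) ((0:Int), true)).2 then acc ++ [id i] else acc) := by
      funext acc i
      cases h : (i.toList.foldl (pvAStep s.toList i.toList) ((0:Int), true)).2 <;> simp [h]
    rw [hfun, PySem.List.foldl_append_if, List.map_id, List.nil_append]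
  have hB : (wl.foldl (fun acc w =>
        if pvBCheckGo ((PySem.List.enumerate s.toList 0).foldl
            (fun (d : PySem.Dict Char Int) pc => d.insert pc.2 pc.1) PySem.Dict.empty)
          PySem.Dict.empty 0 0 w.toList then pvBSel acc w else acc) (("", -1) : String × Int))
      = ((wl.filter (fun w => pvBCheckGo ((PySem.List.enumerate s.toList 0).foldl
            (fun (d : PySem.Dict Char Int) pc => d.insert pc.2 pc.1) PySem.Dict.empty)
          PySem.Dict.empty 0 0 w.toList)).foldl pvBSel ("", -1)) := List.foldl_filter.symm
  simp only [hA, hB]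
  rw [List.filter_congr (fun i _ => pass_eq s.toList i.toList)]
  exact sel_main _

-- ===== VERDICT (by name: the statement is the Claim_ definition above) =====
theorem kind_of_scrable_spec : Claim_equal_kind_of_scrable := by
  intro s wl _ _
  unfold Spec_kind_of_scrable
  exact main_eq s wl
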